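-- pv_equiv track=rewrite | github.com/SylvainDe/aoc | python/2018/day25.py | get_nb_constellations
-- ===== SOURCE A (Python) =====
-- import itertools
-- import collections
--
-- def manhattan(p1, p2):
--     return sum(abs(c1 - c2) for c1, c2 in zip(p1, p2))
--
-- def get_nb_constellations(points):
--     # Compute close points
--     close_pairs = [
--         (i1, i2)  # Work with indices because we do not need the actual values
--         for ((i1, p1), (i2, p2)) in itertools.combinations(enumerate(points), 2)
--         if manhattan(p1, p2) <= 3
--     ]
--     # Compute adjacency matrix
--     links = dict()
--     for a, b in close_pairs:
--         links.setdefault(a, set()).add(b)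
--         links.setdefault(b, set()).add(a)
--     # Compute connected components
--     points = [i for i, p in enumerate(points)]
--     connected_points = set()
--     components = []
--     for p in points:
--         if p not in connected_points:
--             comp = set()
--             queue = collections.deque([p])
--             while queue:
--                 p2 = queue.popleft()
--                 if p2 in comp:
--                     continue
--                 comp.add(p2)
--                 assert p2 not in connected_points
--                 queue.extend(links.get(p2, set()) - comp)
--             components.append(comp)
--             connected_points.update(comp)
--     return len(components)
-- ===== SOURCE B (Python) =====
-- def manhattan(p1, p2):
--     return sum(abs(c1 - c2) for c1, c2 in zip(p1, p2))
--
-- def get_nb_constellations(points):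
--     # Union-find over point indices (union by minimum root); no pair list,
--     # no adjacency dict, no BFS: roots are counted at the end.
--     n = len(points)
--     parent = list(range(n))
--
--     def find(x):
--         while parent[x] != x:
--             x = parent[x]
--         return x
--
--     for i in range(n):
--         for j in range(i):
--             if manhattan(points[i], points[j]) <= 3:
--                 ri, rj = find(i), find(j)
--                 if ri != rj:
--                     if ri < rj:
--                         parent[rj] = ri
--                     else:
--                         parent[ri] = rj
--     return sum(1 for x in range(n) if parent[x] == x)
-- ===== Notes on version B (the rewrite author's own statement) =====
-- stated objective: alternative
-- what changed: Replaced A's pair-list + adjacency-dict + BFS component enumeration by a union-find (union by minimum root) over index pairs, counting roots at the end.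
import Mathlib
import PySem

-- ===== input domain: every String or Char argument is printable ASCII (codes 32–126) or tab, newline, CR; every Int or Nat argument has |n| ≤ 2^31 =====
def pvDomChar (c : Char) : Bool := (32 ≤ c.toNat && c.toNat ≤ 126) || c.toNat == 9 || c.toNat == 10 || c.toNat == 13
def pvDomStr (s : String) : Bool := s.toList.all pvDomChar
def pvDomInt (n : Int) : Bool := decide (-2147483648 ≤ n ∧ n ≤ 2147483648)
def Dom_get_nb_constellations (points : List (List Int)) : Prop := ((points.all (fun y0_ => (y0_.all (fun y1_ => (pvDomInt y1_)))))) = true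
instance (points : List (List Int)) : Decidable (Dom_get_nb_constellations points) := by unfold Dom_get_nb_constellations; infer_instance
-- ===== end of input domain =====

-- B replaces A's pair-list + adjacency-dict + BFS enumeration of components by a
-- union-find over index pairs (union by minimum root), counting roots at the end.


-- ===== PORT A =====
-- manhattan(p1, p2) = sum(abs(c1 - c2) for c1, c2 in zip(p1, p2))
def pvManhattan (p1 p2 : List Int) : Int :=
  ((p1.zip p2).map (fun c => |c.1 - c.2|)).sum

-- enumerate(xs): Python's indices are the nonnegative ints 0,1,…, kept here as Nat
def pvEnum {α : Type} : List α → Nat → List (Nat × α)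
  | [], _ => []
  | x :: xs, k => (k, x) :: pvEnum xs (k + 1)

-- the close_pairs list comprehension over itertools.combinations(enumerate(points), 2)
def pvClosePairs (points : List (List Int)) : List (Nat × Nat) :=
  (PySem.List.combinations (pvEnum points 0) 2).filterMap (fun c =>
    match c with
    | [a, b] => if pvManhattan a.2 b.2 ≤ 3 then some (a.1, b.1) else none
    | _ => none)

-- links.setdefault(a, set()).add(b) = links[a] = links.get(a, set()) | {b}  (Dict.modify)
def pvLinks (points : List (List Int)) : PySem.Dict Nat (PySem.Set Nat) :=
  (pvClosePairs points).foldl (fun d ab =>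
    (d.modify ab.1 PySem.Set.empty (fun s => PySem.Set.add s ab.2)).modify
      ab.2 PySem.Set.empty (fun s => PySem.Set.add s ab.1)) PySem.Dict.empty

-- the 'while queue' BFS loop; the fuel argument only makes the recursion structural
-- (lemma pvBfs_spec below shows the queue always empties before the given fuel runs out)
def pvBfs (links : PySem.Dict Nat (PySem.Set Nat)) :
    Nat → List Nat → PySem.Set Nat → PySem.Set Nat
  | 0, _, comp => comp
  | _ + 1, [], comp => comp
  | fuel + 1, p2 :: queue, comp =>
    if p2 ∈ comp then pvBfs links fuel queue comp
    else
      let comp' := PySem.Set.add comp p2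
      pvBfs links fuel (queue ++ PySem.Set.diff (links.getD p2 PySem.Set.empty) comp') comp'

-- the body of the 'for p in points' loop; state = (connected_points, components)
def pvStepA (links : PySem.Dict Nat (PySem.Set Nat)) (fuel : Nat)
    (st : PySem.Set Nat × List (PySem.Set Nat)) (p : Nat) :
    PySem.Set Nat × List (PySem.Set Nat) :=
  if p ∈ st.1 then st
  else
    let comp := pvBfs links fuel [p] PySem.Set.empty
    (PySem.Set.update st.1 comp, st.2 ++ [comp])

def get_nb_constellations (points : List (List Int)) : Int :=
  let links := pvLinks points
  let pts := (pvEnum points 0).map Prod.fst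
  let fuel := (points.length + 1) * (points.length + 1)
  let res := pts.foldl (pvStepA links fuel) (PySem.Set.empty, [])
  (res.2.length : Int)

-- ===== PORT B =====
-- find(x): while parent[x] != x: x = parent[x]; fuel only makes the loop structural
-- (under B's invariant parent[x] ≤ x the chain strictly decreases, so fuel n suffices)
def pvFind (parent : List Nat) : Nat → Nat → Nat
  | 0, x => x
  | fuel + 1, x =>
    let p := parent.getD x x
    if p = x then x else pvFind parent fuel p

-- the body executed for a close pair (i, j): union by minimum root
def pvUnion (n : Nat) (par : List Nat) (i j : Nat) : List Nat :=
  let ri := pvFind par n i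
  let rj := pvFind par n j
  if ri ≠ rj then (if ri < rj then par.set rj ri else par.set ri rj) else par

def get_nb_constellations_alt (points : List (List Int)) : Int :=
  let n := points.length
  let parent :=
    (List.range n).foldl (fun par i =>
      (List.range i).foldl (fun par j =>
        if pvManhattan (points.getD i []) (points.getD j []) ≤ 3
        then pvUnion n par i j else par) par) (List.range n)
  ((List.range n).countP (fun x => decide (parent.getD x x = x)) : Int)

-- ===== PRECONDITION & SPEC =====
def Spec_get_nb_constellations (points : List (List Int)) (out : Int) : Prop := out = get_nb_constellations_alt points
instance (points : List (List Int)) (out : Int) : Decidable (Spec_get_nb_constellations points out) := by unfold Spec_get_nb_constellations; infer_instance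

-- ===== CLAIM (what is proved, stated in full; the proofs are below) =====
def Claim_equal_get_nb_constellations : Prop := ∀ (points : List (List Int)), Dom_get_nb_constellations points → Spec_get_nb_constellations points (get_nb_constellations points)

-- ===== LEMMAS AND PROOFS =====

-- the graph both programs work on: indices within manhattan distance 3
def pvAdj (points : List (List Int)) (x y : Nat) : Prop :=
  x < points.length ∧ y < points.length ∧ x ≠ y ∧
    pvManhattan (points.getD x []) (points.getD y []) ≤ 3

def pvConn (points : List (List Int)) : Nat → Nat → Prop :=
  Relation.ReflTransGen (pvAdj points)

def pvMinRep (points : List (List Int)) (x : Nat) : Prop :=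
  ∀ j < x, ¬ pvConn points j x

noncomputable def pvCnt (points : List (List Int)) (k : Nat) : Nat :=
  (List.range k).countP (fun j => @decide (pvMinRep points j) (Classical.propDecidable _))

theorem pvManhattan_comm (p q : List Int) : pvManhattan p q = pvManhattan q p := by
  unfold pvManhattan
  rw [← List.zip_swap p q, List.map_map]
  congr 1
  apply List.map_congr_left
  intro c _
  simp [abs_sub_comm]

theorem pvAdj_symm (points : List (List Int)) : Symmetric (pvAdj points) := by
  intro x y h
  obtain ⟨hx, hy, hne, hd⟩ := h
  exact ⟨hy, hx, hne.symm, by rwa [pvManhattan_comm]⟩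

theorem pvConn_symm (points : List (List Int)) : Symmetric (pvConn points) :=
  Relation.ReflTransGen.symmetric (pvAdj_symm points)

-- ===== pvEnum facts =====
theorem pvEnum_map_fst {α : Type} (l : List α) (k : Nat) :
    (pvEnum l k).map Prod.fst = List.range' k l.length := by
  induction l generalizing k with
  | nil => rfl
  | cons x xs ih => simp [pvEnum, List.range'_succ, ih]

theorem mem_pvEnum {α : Type} {l : List α} {k i : Nat} {p : α} :
    (i, p) ∈ pvEnum l k ↔ ∃ j, ∃ _ : j < l.length, i = k + j ∧ l[j] = p := by
  induction l generalizing k with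
  | nil => simp [pvEnum]
  | cons x xs ih =>
    simp only [pvEnum, List.mem_cons, ih]
    constructor
    · rintro (h | ⟨j, hj, rfl, rfl⟩)
      · obtain ⟨rfl, rfl⟩ := Prod.mk.injEq .. ▸ h
        exact ⟨0, by simp, by simp⟩
      · exact ⟨j + 1, by simpa using hj, by omega, by simp⟩
    · rintro ⟨j, hj, rfl, rfl⟩
      cases j with
      | zero => left; simp
      | succ j => right; exact ⟨j, by simpa using hj, by omega, by simp⟩

theorem pair_sublist_pvEnum {α : Type} {a b : Nat × α} {l : List α} :
    List.Sublist [a, b] (pvEnum l 0) ↔ a ∈ pvEnum l 0 ∧ b ∈ pvEnum l 0 ∧ a.1 < b.1 := by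
  have hpw : (pvEnum l 0).Pairwise (fun p q => p.1 < q.1) := by
    have := List.pairwise_lt_range' (s := 0) (n := l.length) (step := 1)
    rw [← pvEnum_map_fst l 0] at this
    exact (List.pairwise_map).mp this
  constructor
  · intro h
    refine ⟨h.subset (by simp), h.subset (by simp), ?_⟩
    have := (List.Pairwise.sublist h hpw)
    simpa using List.rel_of_pairwise_cons this (List.mem_singleton.mpr rfl)
  · rintro ⟨ha, hb, hab⟩
    obtain ⟨u, v, huv⟩ := List.mem_iff_append.mp ha
    rw [huv] at hpw hb ⊢
    have hbv : b ∈ v := by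
      rcases List.mem_append.mp hb with hbu | hbv
      · exfalso
        have := (List.pairwise_append.mp hpw).2.2 b hbu a (by simp)
        omega
      · rcases List.mem_cons.mp hbv with rfl | hbv
        · omega
        · exact hbv
    exact List.sublist_append_of_sublist_right
      (List.Sublist.cons₂ a (List.singleton_sublist.mpr hbv))

-- ===== close pairs and links =====
theorem mem_pvClosePairs {points : List (List Int)} {i j : Nat} :
    (i, j) ∈ pvClosePairs points ↔ i < j ∧ pvAdj points i j := by
  unfold pvClosePairs
  rw [List.mem_filterMap]
  constructor
  · rintro ⟨c, hc, hfc⟩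
    obtain ⟨hsub, hlen⟩ := (PySem.List.mem_combinations_iff _ _ _).mp hc
    obtain ⟨a, b, rfl⟩ := List.length_eq_two.mp hlen
    simp only at hfc
    split at hfc
    · obtain ⟨ha, hb, hab⟩ := pair_sublist_pvEnum.mp hsub
      obtain ⟨ja, hja, hia, hpa⟩ := mem_pvEnum.mp (by exact ha)
      obtain ⟨jb, hjb, hib, hpb⟩ := mem_pvEnum.mp (by exact hb)
      simp only [Option.some.injEq, Prod.mk.injEq] at hfc
      obtain ⟨rfl, rfl⟩ := hfc
      refine ⟨hab, ?_, ?_, by omega, ?_⟩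
      · omega
      · omega
      · rename_i hd
        rw [List.getD_eq_getElem?_getD, List.getD_eq_getElem?_getD]
        have h1 : points[a.1]? = some a.2 := by
          rw [List.getElem?_eq_getElem (by omega)]; simp [hia, ← hpa]
        have h2 : points[b.1]? = some b.2 := by
          rw [List.getElem?_eq_getElem (by omega)]; simp [hib, ← hpb]
        rw [h1, h2]
        exact hd
    · exact absurd hfc (by simp)
  · rintro ⟨hij, hi, hj, hne, hd⟩
    have hd' : pvManhattan (points[i]?.getD []) (points[j]?.getD []) ≤ 3 := by
      rwa [List.getD_eq_getElem?_getD, List.getD_eq_getElem?_getD] at hd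
    refine ⟨[(i, points[i]?.getD []), (j, points[j]?.getD [])], ?_, by simp [hd']⟩
    rw [PySem.List.mem_combinations_iff]
    refine ⟨pair_sublist_pvEnum.mpr ⟨?_, ?_, hij⟩, rfl⟩
    · exact mem_pvEnum.mpr ⟨i, hi, by simp, by rw [List.getElem?_eq_getElem hi]; rfl⟩
    · exact mem_pvEnum.mpr ⟨j, hj, by simp, by rw [List.getElem?_eq_getElem hj]; rfl⟩

theorem mem_getD_modify_add (d : PySem.Dict Nat (PySem.Set Nat)) (a c x y : Nat) :
    y ∈ ((d.modify a PySem.Set.empty (fun s => PySem.Set.add s c)).getD x PySem.Set.empty) ↔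
      y ∈ d.getD x PySem.Set.empty ∨ (x = a ∧ y = c) := by
  rw [PySem.Dict.getD_modify]
  split_ifs with h
  · subst h; simp [PySem.Set.mem_add]
  · simp [h]

theorem linksFold_getD (pairs : List (Nat × Nat)) (d : PySem.Dict Nat (PySem.Set Nat)) (x y : Nat) :
    y ∈ ((pairs.foldl (fun d ab =>
      (d.modify ab.1 PySem.Set.empty (fun s => PySem.Set.add s ab.2)).modify
        ab.2 PySem.Set.empty (fun s => PySem.Set.add s ab.1)) d).getD x PySem.Set.empty) ↔
    y ∈ d.getD x PySem.Set.empty ∨ (x, y) ∈ pairs ∨ (y, x) ∈ pairs := by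
  induction pairs generalizing d with
  | nil => simp
  | cons ab rest ih =>
    obtain ⟨a, b⟩ := ab
    rw [List.foldl_cons, ih]
    rw [mem_getD_modify_add, mem_getD_modify_add]
    simp only [List.mem_cons, Prod.ext_iff]
    tauto

theorem mem_pvLinks {points : List (List Int)} {x y : Nat} :
    y ∈ (pvLinks points).getD x PySem.Set.empty ↔ pvAdj points x y := by
  unfold pvLinks
  rw [linksFold_getD]
  simp only [PySem.Dict.getD_empty]
  constructor
  · rintro (h | h | h)
    · simp [PySem.Set.empty] at h
    · exact (mem_pvClosePairs.mp h).2
    · exact pvAdj_symm points (mem_pvClosePairs.mp h).2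
  · intro h
    rcases Nat.lt_trichotomy x y with hlt | rfl | hlt
    · exact Or.inr (Or.inl (mem_pvClosePairs.mpr ⟨hlt, h⟩))
    · exact absurd rfl h.2.2.1
    · exact Or.inr (Or.inr (mem_pvClosePairs.mpr ⟨hlt, pvAdj_symm points h⟩))

theorem pvLinks_nodup (points : List (List Int)) (x : Nat) :
    ((pvLinks points).getD x PySem.Set.empty).Nodup := by
  unfold pvLinks
  generalize pvClosePairs points = pairs
  suffices h : ∀ d : PySem.Dict Nat (PySem.Set Nat),
      (∀ z, (d.getD z PySem.Set.empty).Nodup) →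
      ((pairs.foldl (fun d ab =>
        (d.modify ab.1 PySem.Set.empty (fun s => PySem.Set.add s ab.2)).modify
          ab.2 PySem.Set.empty (fun s => PySem.Set.add s ab.1)) d).getD x PySem.Set.empty).Nodup by
    exact h _ (by simp [PySem.Set.empty])
  induction pairs with
  | nil => intro d hd; exact hd x
  | cons ab rest ih =>
    intro d hd
    rw [List.foldl_cons]
    apply ih
    intro z
    simp only [PySem.Dict.getD_modify]
    split <;> split <;> first
      | exact PySem.Set.nodup_add _ _ (PySem.Set.nodup_add _ _ (hd _))
      | exact PySem.Set.nodup_add _ _ (hd _)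
      | exact hd _

theorem pvLinks_len_le (points : List (List Int)) (x : Nat) :
    ((pvLinks points).getD x PySem.Set.empty).length ≤ points.length := by
  set l := (pvLinks points).getD x PySem.Set.empty with hl
  have hnd : l.Nodup := pvLinks_nodup points x
  have hsub : l.toFinset ⊆ Finset.range points.length := by
    intro y hy
    rw [List.mem_toFinset] at hy
    rw [Finset.mem_range]
    exact (mem_pvLinks.mp hy).2.1
  calc l.length = l.toFinset.card := (List.toFinset_card_of_nodup hnd).symm
    _ ≤ (Finset.range points.length).card := Finset.card_le_card hsub
    _ = points.length := Finset.card_range _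

-- ===== BFS correctness =====
-- the termination measure: queue length plus, for every unvisited vertex, 1 + its degree
def pvM (n : Nat) (links : PySem.Dict Nat (PySem.Set Nat)) (queue : List Nat)
    (comp : PySem.Set Nat) : Nat :=
  queue.length + ∑ x ∈ (Finset.range n).filter (fun x => x ∉ comp),
    (1 + (links.getD x PySem.Set.empty).length)

theorem pvBfs_spec (points : List (List Int)) (links : PySem.Dict Nat (PySem.Set Nat))
    (hlinks : ∀ x y, y ∈ links.getD x PySem.Set.empty ↔ pvAdj points x y) :
    ∀ (fuel : Nat) (queue : List Nat) (comp : PySem.Set Nat) (p : Nat),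
      pvM points.length links queue comp < fuel →
      (∀ x ∈ queue, pvConn points p x ∧ x < points.length) →
      (∀ x ∈ comp, pvConn points p x ∧ x < points.length) →
      (∀ x ∈ comp, ∀ y, pvAdj points x y → y ∈ comp ∨ y ∈ queue) →
      (p ∈ comp ∨ p ∈ queue) →
      ∀ q, q ∈ pvBfs links fuel queue comp ↔ pvConn points p q := by
  intro fuel
  induction fuel with
  | zero => intro queue comp p hfuel; omega
  | succ fuel ih =>
    intro queue comp p hfuel hqueue hcomp hclosed hp q
    cases queue with
    | nil =>
      simp only [pvBfs]
      constructor
      · intro h; exact (hcomp q h).1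
      · intro hconn
        induction hconn with
        | refl =>
          rcases hp with h | h
          · exact h
          · simp at h
        | tail h1 h2 ih2 =>
          rcases hclosed _ ih2 _ h2 with h | h
          · exact h
          · simp at h
    | cons x rest =>
      simp only [pvBfs]
      by_cases hx : x ∈ comp
      · rw [if_pos hx]
        apply ih rest comp p
        · unfold pvM at hfuel ⊢; simp only [List.length_cons] at hfuel; omega
        · intro z hz; exact hqueue z (List.mem_cons_of_mem _ hz)
        · exact hcomp
        · intro z hz y hadj
          rcases hclosed z hz y hadj with h | h
          · exact Or.inl h
          · rcases List.mem_cons.mp h with rfl | h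
            · exact Or.inl hx
            · exact Or.inr h
        · rcases hp with h | h
          · exact Or.inl h
          · rcases List.mem_cons.mp h with rfl | h
            · exact Or.inl hx
            · exact Or.inr h
      · rw [if_neg hx]
        have hxq := hqueue x (List.mem_cons_self ..)
        have hxn : x < points.length := hxq.2
        have hconnx : pvConn points p x := hxq.1
        have hmem' : ∀ z, z ∈ PySem.Set.add comp x ↔ z ∈ comp ∨ z = x :=
          fun z => PySem.Set.mem_add comp x z
        apply ih _ _ p
        · -- fuel bound
          have hq' : (rest ++ PySem.Set.diff (links.getD x PySem.Set.empty)
              (PySem.Set.add comp x)).length ≤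
              rest.length + (links.getD x PySem.Set.empty).length := by
            rw [List.length_append]
            have : (PySem.Set.diff (links.getD x PySem.Set.empty) (PySem.Set.add comp x)).length ≤
                (links.getD x PySem.Set.empty).length := by
              simp only [PySem.Set.diff]
              exact List.length_filter_le _ _
            omega
          have hxF : x ∈ (Finset.range points.length).filter (fun z => z ∉ comp) := by
            simp [hxn, hx]
          have hFe : (Finset.range points.length).filter (fun z => z ∉ PySem.Set.add comp x) =
              ((Finset.range points.length).filter (fun z => z ∉ comp)).erase x := by
            ext z
            simp only [Finset.mem_filter, Finset.mem_erase, Finset.mem_range, hmem']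
            tauto
          have hsum : (1 + (links.getD x PySem.Set.empty).length) +
              ∑ z ∈ ((Finset.range points.length).filter (fun z => z ∉ comp)).erase x,
                (1 + (links.getD z PySem.Set.empty).length) =
              ∑ z ∈ (Finset.range points.length).filter (fun z => z ∉ comp),
                (1 + (links.getD z PySem.Set.empty).length) :=
            Finset.add_sum_erase _
              (f := fun z => 1 + (links.getD z PySem.Set.empty).length) hxF
          unfold pvM at hfuel ⊢
          rw [hFe]
          simp only [List.length_cons] at hfuel
          omega
        · intro z hz
          rcases List.mem_append.mp hz with h | h
          · exact hqueue z (List.mem_cons_of_mem _ h)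
          · have hzl : z ∈ links.getD x PySem.Set.empty := ((PySem.Set.mem_diff _ _ _).mp h).1
            have hadj := (hlinks x z).mp hzl
            exact ⟨hconnx.tail hadj, hadj.2.1⟩
        · intro z hz
          rcases (hmem' z).mp hz with h | rfl
          · exact hcomp z h
          · exact ⟨hconnx, hxn⟩
        · intro z hz y hadj
          rcases (hmem' z).mp hz with h | rfl
          · rcases hclosed z h y hadj with h2 | h2
            · exact Or.inl ((hmem' y).mpr (Or.inl h2))
            · rcases List.mem_cons.mp h2 with rfl | h2
              · exact Or.inl ((hmem' y).mpr (Or.inr rfl))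
              · exact Or.inr (List.mem_append_left _ h2)
          · have hyl : y ∈ links.getD z PySem.Set.empty := (hlinks z y).mpr hadj
            by_cases hy : y ∈ PySem.Set.add comp z
            · exact Or.inl hy
            · exact Or.inr (List.mem_append_right _ ((PySem.Set.mem_diff _ _ _).mpr ⟨hyl, hy⟩))
        · rcases hp with h | h
          · exact Or.inl ((hmem' p).mpr (Or.inl h))
          · rcases List.mem_cons.mp h with rfl | h
            · exact Or.inl ((hmem' p).mpr (Or.inr rfl))
            · exact Or.inr (List.mem_append_left _ h)

theorem pvBfs_from_seed (points : List (List Int)) {p : Nat} (hp : p < points.length) :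
    ∀ q, q ∈ pvBfs (pvLinks points) ((points.length + 1) * (points.length + 1)) [p]
      PySem.Set.empty ↔ pvConn points p q := by
  apply pvBfs_spec points (pvLinks points) (fun x y => mem_pvLinks)
  · -- the fuel is sufficient
    unfold pvM
    have hfe : (Finset.range points.length).filter
        (fun z => z ∉ (PySem.Set.empty : PySem.Set Nat)) = Finset.range points.length := by
      apply Finset.filter_true_of_mem
      intro z _
      simp [PySem.Set.empty]
    rw [hfe]
    have hb : ∑ x ∈ Finset.range points.length,
        (1 + ((pvLinks points).getD x PySem.Set.empty).length) ≤
        points.length * (1 + points.length) := by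
      calc ∑ x ∈ Finset.range points.length,
            (1 + ((pvLinks points).getD x PySem.Set.empty).length)
          ≤ ∑ _x ∈ Finset.range points.length, (1 + points.length) := by
            apply Finset.sum_le_sum
            intro i _
            have := pvLinks_len_le points i
            omega
        _ = points.length * (1 + points.length) := by
            rw [Finset.sum_const, Finset.card_range, smul_eq_mul]
    have h1 : points.length * (1 + points.length) = points.length + points.length * points.length := by ring
    have h2 : (points.length + 1) * (points.length + 1) =
        points.length * points.length + 2 * points.length + 1 := by ring
    simp only [List.length_cons, List.length_nil]
    omega
  · intro x hxm
    rcases List.mem_cons.mp hxm with rfl | h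
    · exact ⟨Relation.ReflTransGen.refl, hp⟩
    · simp at h
  · intro x hxm; simp [PySem.Set.empty] at hxm
  · intro x hxm; simp [PySem.Set.empty] at hxm
  · exact Or.inr (List.mem_cons_self ..)

-- ===== counting minimal representatives =====
theorem pvCnt_succ_of {points : List (List Int)} {k : Nat} (h : pvMinRep points k) :
    pvCnt points (k + 1) = pvCnt points k + 1 := by
  unfold pvCnt
  rw [List.range_succ, List.countP_append]
  have hd : (@decide (pvMinRep points k) (Classical.propDecidable (pvMinRep points k))) = true := @decide_eq_true _ (Classical.propDecidable _) h
  simp [hd]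

theorem pvCnt_succ_not {points : List (List Int)} {k : Nat} (h : ¬ pvMinRep points k) :
    pvCnt points (k + 1) = pvCnt points k := by
  unfold pvCnt
  rw [List.range_succ, List.countP_append]
  have hd : (@decide (pvMinRep points k) (Classical.propDecidable (pvMinRep points k))) = false := @decide_eq_false _ (Classical.propDecidable _) h
  simp [hd]

-- ===== the outer loop of A counts minimal representatives =====
theorem pvFoldA_inv (points : List (List Int)) (k : Nat) (hk : k ≤ points.length) :
    (∀ q, q ∈ ((List.range k).foldl
        (pvStepA (pvLinks points) ((points.length + 1) * (points.length + 1)))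
        (PySem.Set.empty, [])).1 ↔ ∃ j, j < k ∧ pvConn points j q) ∧
    ((List.range k).foldl
        (pvStepA (pvLinks points) ((points.length + 1) * (points.length + 1)))
        (PySem.Set.empty, [])).2.length = pvCnt points k := by
  induction k with
  | zero => constructor
            · intro q; simp [PySem.Set.empty]
            · simp [pvCnt]
  | succ k ih =>
    obtain ⟨ihCP, ihlen⟩ := ih (Nat.le_of_succ_le hk)
    have hkn : k < points.length := hk
    rw [List.range_succ, List.foldl_append, List.foldl_cons, List.foldl_nil]
    set st := (List.range k).foldl
        (pvStepA (pvLinks points) ((points.length + 1) * (points.length + 1)))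
        (PySem.Set.empty, []) with hst
    unfold pvStepA
    by_cases hkin : k ∈ st.1
    · rw [if_pos hkin]
      obtain ⟨j0, hj0, hconn0⟩ := ihCP k |>.mp hkin
      constructor
      · intro q
        rw [ihCP q]
        constructor
        · rintro ⟨j, hj, hconn⟩; exact ⟨j, by omega, hconn⟩
        · rintro ⟨j, hj, hconn⟩
          rcases Nat.lt_succ_iff_lt_or_eq.mp hj with hj | rfl
          · exact ⟨j, hj, hconn⟩
          · exact ⟨j0, hj0, hconn0.trans hconn⟩
      · rw [ihlen, pvCnt_succ_not]
        intro hmr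
        exact hmr j0 hj0 hconn0
    · rw [if_neg hkin]
      have hbfs := pvBfs_from_seed points hkn
      constructor
      · intro q
        rw [PySem.Set.mem_update, ihCP q, hbfs q]
        constructor
        · rintro (⟨j, hj, hconn⟩ | hconn)
          · exact ⟨j, by omega, hconn⟩
          · exact ⟨k, by omega, hconn⟩
        · rintro ⟨j, hj, hconn⟩
          rcases Nat.lt_succ_iff_lt_or_eq.mp hj with hj | rfl
          · exact Or.inl ⟨j, hj, hconn⟩
          · exact Or.inr hconn
      · simp only [List.length_append, List.length_cons, List.length_nil, ihlen]
        rw [pvCnt_succ_of]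
        intro j hj hconn
        exact hkin ((ihCP k).mpr ⟨j, hj, hconn⟩)

theorem A_eq_cnt (points : List (List Int)) :
    get_nb_constellations points = (pvCnt points points.length : Int) := by
  unfold get_nb_constellations
  simp only [pvEnum_map_fst, ← List.range_eq_range']
  exact_mod_cast (pvFoldA_inv points points.length le_rfl).2

-- ===== union-find (B side) =====
-- connectivity generated by an explicit edge list
def pvRel (es : List (Nat × Nat)) (x y : Nat) : Prop := (x, y) ∈ es ∨ (y, x) ∈ es

def pvCl (es : List (Nat × Nat)) : Nat → Nat → Prop := Relation.ReflTransGen (pvRel es)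

-- parent pointers never increase (B's union-by-minimum maintains this)
def pvHdec (parent : List Nat) : Prop := ∀ x, parent.getD x x ≤ x

-- the union-find invariant: length, decreasing pointers, every vertex connected to its
-- parent, and connected vertices share their root
def pvGood (n : Nat) (parent : List Nat) (es : List (Nat × Nat)) : Prop :=
  parent.length = n ∧ pvHdec parent ∧
  (∀ x, x < n → pvCl es x (parent.getD x x)) ∧
  (∀ x y, x < n → y < n → pvCl es x y → pvFind parent n x = pvFind parent n y)

theorem pvFind_eq_self {parent : List Nat} {x : Nat} (h : parent.getD x x = x) (f : Nat) :
    pvFind parent f x = x := by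
  cases f with
  | zero => rfl
  | succ f =>
    simp only [pvFind]
    rw [if_pos h]

theorem pvFind_fuel {parent : List Nat} (hdec : pvHdec parent) :
    ∀ x f g, x < f → x < g → pvFind parent f x = pvFind parent g x := by
  intro x
  induction x using Nat.strong_induction_on with
  | _ x ih =>
    intro f g hf hg
    cases f with
    | zero => omega
    | succ f =>
      cases g with
      | zero => omega
      | succ g =>
        by_cases h : parent.getD x x = x
        · simp only [pvFind]
          rw [if_pos h, if_pos h]
        · have hlt : parent.getD x x < x := lt_of_le_of_ne (hdec x) h
          simp only [pvFind, if_neg h]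
          exact ih _ hlt _ _ (by omega) (by omega)

theorem pvFind_le {parent : List Nat} (hdec : pvHdec parent) :
    ∀ x f, x < f → pvFind parent f x ≤ x := by
  intro x
  induction x using Nat.strong_induction_on with
  | _ x ih =>
    intro f hf
    cases f with
    | zero => omega
    | succ f =>
      by_cases h : parent.getD x x = x
      · simp only [pvFind]
        rw [if_pos h]
      · have hlt : parent.getD x x < x := lt_of_le_of_ne (hdec x) h
        simp only [pvFind, if_neg h]
        have := ih _ hlt f (by omega)
        omega

theorem pvFind_root {parent : List Nat} (hdec : pvHdec parent) :
    ∀ x f, x < f →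
      parent.getD (pvFind parent f x) (pvFind parent f x) = pvFind parent f x := by
  intro x
  induction x using Nat.strong_induction_on with
  | _ x ih =>
    intro f hf
    cases f with
    | zero => omega
    | succ f =>
      by_cases h : parent.getD x x = x
      · simp only [pvFind]
        rw [if_pos h]
        exact h
      · have hlt : parent.getD x x < x := lt_of_le_of_ne (hdec x) h
        simp only [pvFind, if_neg h]
        exact ih _ hlt f (by omega)

theorem pvFind_step {parent : List Nat} (hdec : pvHdec parent) {x f : Nat}
    (hx : x < f) (hne : parent.getD x x ≠ x) :
    pvFind parent f x = pvFind parent f (parent.getD x x) := by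
  cases f with
  | zero => omega
  | succ f =>
    have hlt : parent.getD x x < x := lt_of_le_of_ne (hdec x) hne
    have hstep : pvFind parent (f + 1) x = pvFind parent f (parent.getD x x) := by
      simp only [pvFind]
      rw [if_neg hne]
    rw [hstep]
    exact pvFind_fuel hdec _ f (f + 1) (by omega) (by omega)

theorem pvRel_symm (es : List (Nat × Nat)) : Symmetric (pvRel es) :=
  fun _ _ h => h.elim Or.inr Or.inl

theorem pvCl_symm (es : List (Nat × Nat)) : Symmetric (pvCl es) :=
  Relation.ReflTransGen.symmetric (pvRel_symm es)

theorem pvCl_nil {x y : Nat} (h : pvCl [] x y) : x = y := by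
  induction h with
  | refl => rfl
  | tail h1 h2 ih => simp [pvRel] at h2

theorem pvCl_mono {es : List (Nat × Nat)} (a b : Nat) {x y : Nat} (h : pvCl es x y) :
    pvCl (es ++ [(a, b)]) x y := by
  refine Relation.ReflTransGen.mono ?_ h
  rintro u v (h | h)
  · exact Or.inl (List.mem_append_left _ h)
  · exact Or.inr (List.mem_append_left _ h)

theorem pvCl_append (es : List (Nat × Nat)) (a b x y : Nat) :
    pvCl (es ++ [(a, b)]) x y ↔
      pvCl es x y ∨ (pvCl es x a ∧ pvCl es b y) ∨ (pvCl es x b ∧ pvCl es a y) := by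
  constructor
  · intro h
    induction h with
    | refl => exact Or.inl Relation.ReflTransGen.refl
    | tail h1 h2 ih =>
      rename_i c d
      have h2' : pvRel es c d ∨ (c = a ∧ d = b) ∨ (c = b ∧ d = a) := by
        rcases h2 with h2 | h2 <;> rw [List.mem_append] at h2
        · rcases h2 with h2 | h2
          · exact Or.inl (Or.inl h2)
          · simp only [List.mem_singleton, Prod.mk.injEq] at h2
            tauto
        · rcases h2 with h2 | h2
          · exact Or.inl (Or.inr h2)
          · simp only [List.mem_singleton, Prod.mk.injEq] at h2
            tauto
      rcases h2' with h2' | ⟨rfl, rfl⟩ | ⟨rfl, rfl⟩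
      · rcases ih with ih | ⟨i1, i2⟩ | ⟨i1, i2⟩
        · exact Or.inl (ih.tail h2')
        · exact Or.inr (Or.inl ⟨i1, i2.tail h2'⟩)
        · exact Or.inr (Or.inr ⟨i1, i2.tail h2'⟩)
      · rcases ih with ih | ⟨i1, i2⟩ | ⟨i1, i2⟩
        · exact Or.inr (Or.inl ⟨ih, Relation.ReflTransGen.refl⟩)
        · exact Or.inr (Or.inl ⟨i1, Relation.ReflTransGen.refl⟩)
        · exact Or.inl i1
      · rcases ih with ih | ⟨i1, i2⟩ | ⟨i1, i2⟩
        · exact Or.inr (Or.inr ⟨ih, Relation.ReflTransGen.refl⟩)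
        · exact Or.inl i1
        · exact Or.inr (Or.inr ⟨i1, Relation.ReflTransGen.refl⟩)
  · have hedge_ab : pvRel (es ++ [(a, b)]) a b := Or.inl (List.mem_append_right _ (by simp))
    have hedge_ba : pvRel (es ++ [(a, b)]) b a := Or.inr (List.mem_append_right _ (by simp))
    rintro (h | ⟨h1, h2⟩ | ⟨h1, h2⟩)
    · exact pvCl_mono a b h
    · exact ((pvCl_mono a b h1).tail hedge_ab).trans (pvCl_mono a b h2)
    · exact ((pvCl_mono a b h1).tail hedge_ba).trans (pvCl_mono a b h2)

theorem pvGood_reach_root (n : Nat) (parent : List Nat) (es : List (Nat × Nat))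
    (hg : pvGood n parent es) : ∀ x, x < n → pvCl es x (pvFind parent n x) := by
  obtain ⟨hlen, hdec, hreach, hcong⟩ := hg
  intro x
  induction x using Nat.strong_induction_on with
  | _ x ih =>
    intro hx
    by_cases h : parent.getD x x = x
    · rw [pvFind_eq_self h]
      exact Relation.ReflTransGen.refl
    · have hlt : parent.getD x x < x := lt_of_le_of_ne (hdec x) h
      rw [pvFind_step hdec hx h]
      exact (hreach x hx).trans (ih _ hlt (by omega))

theorem pvFind_set {parent : List Nat} {n w l : Nat} (hdec : pvHdec parent)
    (hlen : parent.length = n) (hwl : w < l) (hl : l < n)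
    (hlroot : parent.getD l l = l) (hwroot : parent.getD w w = w) :
    ∀ x, x < n → pvFind (parent.set l w) n x =
      if pvFind parent n x = l then w else pvFind parent n x := by
  have hget : ∀ z, (parent.set l w).getD z z = if z = l then w else parent.getD z z := by
    intro z
    rw [List.getD_eq_getElem?_getD, List.getD_eq_getElem?_getD]
    by_cases hz : z = l
    · subst hz
      rw [List.getElem?_set_self (by omega)]
      simp
    · rw [List.getElem?_set_ne (Ne.symm hz)]
      simp [hz]
  have hdec' : pvHdec (parent.set l w) := by
    intro z
    rw [hget z]
    split_ifs with hz
    · omega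
    · exact hdec z
  intro x
  induction x using Nat.strong_induction_on with
  | _ x ih =>
    intro hx
    by_cases hxl : x = l
    · subst hxl
      rw [pvFind_eq_self hlroot, if_pos rfl]
      have h1 : (parent.set x w).getD x x = w := by rw [hget]; simp
      have hne : (parent.set x w).getD x x ≠ x := by rw [h1]; omega
      rw [pvFind_step hdec' hx hne, h1]
      apply pvFind_eq_self
      rw [hget, if_neg (show ¬ w = x by omega)]
      exact hwroot
    · have hgx : (parent.set l w).getD x x = parent.getD x x := by rw [hget]; simp [hxl]
      by_cases hroot : parent.getD x x = x
      · rw [pvFind_eq_self hroot, pvFind_eq_self (hgx.trans hroot), if_neg hxl]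
      · have hlt : parent.getD x x < x := lt_of_le_of_ne (hdec x) hroot
        have hne' : (parent.set l w).getD x x ≠ x := by rw [hgx]; exact hroot
        rw [pvFind_step hdec' hx hne', pvFind_step hdec hx hroot, hgx]
        exact ih _ hlt (by omega)

theorem pvUnion_good (n : Nat) (es : List (Nat × Nat)) (parent : List Nat)
    (hg : pvGood n parent es) {a b : Nat} (ha : a < n) (hb : b < n) :
    pvGood n (pvUnion n parent a b) (es ++ [(a, b)]) := by
  obtain ⟨hlen, hdec, hreach, hcong⟩ := hg
  have hconn_a : pvCl es a (pvFind parent n a) :=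
    pvGood_reach_root n parent es ⟨hlen, hdec, hreach, hcong⟩ a ha
  have hconn_b : pvCl es b (pvFind parent n b) :=
    pvGood_reach_root n parent es ⟨hlen, hdec, hreach, hcong⟩ b hb
  have hra_le : pvFind parent n a ≤ a := pvFind_le hdec a n ha
  have hrb_le : pvFind parent n b ≤ b := pvFind_le hdec b n hb
  have hra_root := pvFind_root hdec a n ha
  have hrb_root := pvFind_root hdec b n hb
  set ra := pvFind parent n a with hra
  set rb := pvFind parent n b with hrb
  unfold pvUnion
  rw [← hra, ← hrb]
  by_cases hne : ra = rb
  · rw [if_neg (not_not_intro hne)]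
    refine ⟨hlen, hdec, fun x hx => pvCl_mono a b (hreach x hx), ?_⟩
    intro x y hx hy hxy
    rcases (pvCl_append es a b x y).mp hxy with h | ⟨h1, h2⟩ | ⟨h1, h2⟩
    · exact hcong x y hx hy h
    · rw [hcong x a hx ha h1, hcong y b hy hb ((pvCl_symm es) h2), ← hra, ← hrb, hne]
    · rw [hcong x b hx hb h1, hcong y a hy ha ((pvCl_symm es) h2), ← hra, ← hrb, hne]
  · rw [if_pos hne]
    have hedge_ab : pvRel (es ++ [(a, b)]) a b := Or.inl (List.mem_append_right _ (by simp))
    have hedge_ba : pvRel (es ++ [(a, b)]) b a := Or.inr (List.mem_append_right _ (by simp))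
    by_cases hlt : ra < rb
    · rw [if_pos hlt]
      have hfs := pvFind_set hdec hlen hlt (by omega) hrb_root hra_root
      refine ⟨by rw [List.length_set]; exact hlen, ?_, ?_, ?_⟩
      · intro z
        rw [List.getD_eq_getElem?_getD]
        by_cases hz : z = rb
        · subst hz
          rw [List.getElem?_set_self (by omega)]
          simpa using (by omega : ra ≤ rb)
        · rw [List.getElem?_set_ne (Ne.symm hz), ← List.getD_eq_getElem?_getD]
          exact hdec z
      · intro x hx
        by_cases hz : x = rb
        · subst hz
          have hgd : (parent.set rb ra).getD rb rb = ra := by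
            rw [List.getD_eq_getElem?_getD, List.getElem?_set_self (by omega)]
            rfl
          rw [hgd]
          exact ((pvCl_mono a b ((pvCl_symm es) hconn_b)).tail hedge_ba).trans
            (pvCl_mono a b hconn_a)
        · have hgd : (parent.set rb ra).getD x x = parent.getD x x := by
            rw [List.getD_eq_getElem?_getD, List.getElem?_set_ne (Ne.symm hz),
              ← List.getD_eq_getElem?_getD]
          rw [hgd]
          exact pvCl_mono a b (hreach x hx)
      · intro x y hx hy hxy
        rw [hfs x hx, hfs y hy]
        rcases (pvCl_append es a b x y).mp hxy with h | ⟨h1, h2⟩ | ⟨h1, h2⟩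
        · rw [hcong x y hx hy h]
        · rw [hcong x a hx ha h1, hcong y b hy hb ((pvCl_symm es) h2), ← hra, ← hrb]
          simp [hne]
        · rw [hcong x b hx hb h1, hcong y a hy ha ((pvCl_symm es) h2), ← hra, ← hrb]
          simp [hne]
    · rw [if_neg hlt]
      have hwl : rb < ra := by omega
      have hfs := pvFind_set hdec hlen hwl (by omega) hra_root hrb_root
      refine ⟨by rw [List.length_set]; exact hlen, ?_, ?_, ?_⟩
      · intro z
        rw [List.getD_eq_getElem?_getD]
        by_cases hz : z = ra
        · subst hz
          rw [List.getElem?_set_self (by omega)]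
          simpa using (by omega : rb ≤ ra)
        · rw [List.getElem?_set_ne (Ne.symm hz), ← List.getD_eq_getElem?_getD]
          exact hdec z
      · intro x hx
        by_cases hz : x = ra
        · subst hz
          have hgd : (parent.set ra rb).getD ra ra = rb := by
            rw [List.getD_eq_getElem?_getD, List.getElem?_set_self (by omega)]
            rfl
          rw [hgd]
          exact ((pvCl_mono a b ((pvCl_symm es) hconn_a)).tail hedge_ab).trans
            (pvCl_mono a b hconn_b)
        · have hgd : (parent.set ra rb).getD x x = parent.getD x x := by
            rw [List.getD_eq_getElem?_getD, List.getElem?_set_ne (Ne.symm hz),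
              ← List.getD_eq_getElem?_getD]
          rw [hgd]
          exact pvCl_mono a b (hreach x hx)
      · intro x y hx hy hxy
        rw [hfs x hx, hfs y hy]
        rcases (pvCl_append es a b x y).mp hxy with h | ⟨h1, h2⟩ | ⟨h1, h2⟩
        · rw [hcong x y hx hy h]
        · rw [hcong x a hx ha h1, hcong y b hy hb ((pvCl_symm es) h2), ← hra, ← hrb]
          simp [Ne.symm hne]
        · rw [hcong x b hx hb h1, hcong y a hy ha ((pvCl_symm es) h2), ← hra, ← hrb]
          simp [Ne.symm hne]

theorem pvUF_fold (n : Nat) : ∀ (es2 : List (Nat × Nat)) (parent : List Nat)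
    (es : List (Nat × Nat)), pvGood n parent es → (∀ e ∈ es2, e.1 < n ∧ e.2 < n) →
    pvGood n (es2.foldl (fun par e => pvUnion n par e.1 e.2) parent) (es ++ es2) := by
  intro es2
  induction es2 with
  | nil => intro parent es hg _; simpa using hg
  | cons e rest ih =>
    intro parent es hg hb
    rw [List.foldl_cons]
    have h := ih (pvUnion n parent e.1 e.2) (es ++ [(e.1, e.2)])
      (pvUnion_good n es parent hg (hb e (by simp)).1 (hb e (by simp)).2)
      (fun e' he' => hb e' (by simp [he']))
    simpa [List.append_assoc] using h

theorem pvGood_init (n : Nat) : pvGood n (List.range n) [] := by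
  have hget : ∀ x, x < n → (List.range n).getD x x = x := by
    intro x hx
    rw [List.getD_eq_getElem?_getD, List.getElem?_range hx]
    rfl
  refine ⟨List.length_range, ?_, ?_, ?_⟩
  · intro x
    by_cases hx : x < n
    · rw [hget x hx]
    · rw [List.getD_eq_getElem?_getD, List.getElem?_eq_none (by simpa using hx)]
      simp
  · intro x hx
    rw [hget x hx]
    exact Relation.ReflTransGen.refl
  · intro x y hx hy hxy
    rw [pvCl_nil hxy]

-- ===== B's nested loop as a fold over the close pairs =====
def pvL (points : List (List Int)) : List (Nat × Nat) :=
  (List.range points.length).flatMap (fun i =>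
    ((List.range i).filter (fun j =>
      decide (pvManhattan (points.getD i []) (points.getD j []) ≤ 3))).map (fun j => (i, j)))

theorem B_parent_eq (points : List (List Int)) :
    (List.range points.length).foldl (fun par i =>
      (List.range i).foldl (fun par j =>
        if pvManhattan (points.getD i []) (points.getD j []) ≤ 3
        then pvUnion points.length par i j else par) par) (List.range points.length) =
    (pvL points).foldl (fun par e => pvUnion points.length par e.1 e.2)
      (List.range points.length) := by
  unfold pvL
  rw [List.foldl_flatMap]
  congr 1
  funext par i
  rw [PySem.List.foldl_ite_eq_foldl_filter
    (p := fun j => pvManhattan (points.getD i []) (points.getD j []) ≤ 3)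
    (f := fun par j => pvUnion points.length par i j), List.foldl_map]

theorem mem_pvL {points : List (List Int)} {x y : Nat} :
    (x, y) ∈ pvL points ↔ y < x ∧ x < points.length ∧
      pvManhattan (points.getD x []) (points.getD y []) ≤ 3 := by
  unfold pvL
  rw [List.mem_flatMap]
  constructor
  · rintro ⟨i, hi, hmem⟩
    rw [List.mem_map] at hmem
    obtain ⟨j, hj, heq⟩ := hmem
    rw [List.mem_filter, List.mem_range] at hj
    cases heq
    rw [List.mem_range] at hi
    exact ⟨hj.1, hi, of_decide_eq_true hj.2⟩
  · rintro ⟨h1, h2, h3⟩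
    exact ⟨x, List.mem_range.mpr h2, List.mem_map.mpr
      ⟨y, List.mem_filter.mpr ⟨List.mem_range.mpr h1, decide_eq_true h3⟩, rfl⟩⟩

theorem pvRel_L_iff {points : List (List Int)} {x y : Nat} :
    pvRel (pvL points) x y ↔ pvAdj points x y := by
  constructor
  · rintro (h | h)
    · obtain ⟨h1, h2, h3⟩ := mem_pvL.mp h
      exact ⟨h2, by omega, by omega, h3⟩
    · obtain ⟨h1, h2, h3⟩ := mem_pvL.mp h
      exact pvAdj_symm points ⟨h2, by omega, by omega, h3⟩
  · rintro ⟨hx, hy, hne, hd⟩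
    rcases Nat.lt_or_ge x y with hlt | hge
    · exact Or.inr (mem_pvL.mpr ⟨hlt, hy, by rwa [pvManhattan_comm]⟩)
    · exact Or.inl (mem_pvL.mpr ⟨by omega, hx, hd⟩)

theorem pvCl_L_iff {points : List (List Int)} {x y : Nat} :
    pvCl (pvL points) x y ↔ pvConn points x y :=
  ⟨Relation.ReflTransGen.mono (fun _ _ h => pvRel_L_iff.mp h),
   Relation.ReflTransGen.mono (fun _ _ h => pvRel_L_iff.mpr h)⟩

theorem B_eq_cnt (points : List (List Int)) :
    get_nb_constellations_alt points = (pvCnt points points.length : Int) := by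
  unfold get_nb_constellations_alt
  show ((List.range points.length).countP (fun x => decide
      ((((List.range points.length).foldl (fun par i =>
        (List.range i).foldl (fun par j =>
          if pvManhattan (points.getD i []) (points.getD j []) ≤ 3
          then pvUnion points.length par i j else par) par)
        (List.range points.length)).getD x x = x))) : Int) =
    (pvCnt points points.length : Int)
  rw [B_parent_eq]
  set parentF := (pvL points).foldl (fun par e => pvUnion points.length par e.1 e.2)
    (List.range points.length) with hparentF
  have hgood : pvGood points.length parentF (pvL points) := by
    have h := pvUF_fold points.length (pvL points) (List.range points.length) []
      (pvGood_init points.length) ?_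
    · simpa using h
    · intro e he
      obtain ⟨x, y⟩ := e
      obtain ⟨h1, h2, _⟩ := mem_pvL.mp he
      exact ⟨h2, by omega⟩
  obtain ⟨hlen, hdec, hreach, hcong⟩ := hgood
  have hcount : (List.range points.length).countP
      (fun x => decide (parentF.getD x x = x)) = pvCnt points points.length := by
    unfold pvCnt
    apply List.countP_congr
    intro x hx
    rw [List.mem_range] at hx
    simp only [decide_eq_true_eq]
    constructor
    · intro hroot j hj hconn
      have hjx : pvCl (pvL points) j x := pvCl_L_iff.mpr hconn
      have heqr := hcong j x (by omega) hx hjx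
      have hRx : pvFind parentF points.length x = x := pvFind_eq_self hroot _
      have hRj_le : pvFind parentF points.length j ≤ j := pvFind_le hdec j _ (by omega)
      omega
    · intro hmin
      have hRx_le : pvFind parentF points.length x ≤ x := pvFind_le hdec x _ hx
      rcases Nat.lt_or_ge (pvFind parentF points.length x) x with hlt | hge
      · exfalso
        have hcl : pvCl (pvL points) x (pvFind parentF points.length x) :=
          pvGood_reach_root _ _ _ ⟨hlen, hdec, hreach, hcong⟩ x hx
        exact hmin _ hlt (pvConn_symm points (pvCl_L_iff.mp hcl))
      · have hRx : pvFind parentF points.length x = x := by omega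
        have hr := pvFind_root hdec x points.length hx
        rwa [hRx] at hr
  exact_mod_cast hcount

-- ===== VERDICT (by name: the statement is the Claim_ definition above) =====
theorem get_nb_constellations_spec : Claim_equal_get_nb_constellations := by
  intro points _
  unfold Spec_get_nb_constellations
  rw [A_eq_cnt, B_eq_cnt]
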